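-- pv_equiv track=rewrite | github.com/LeackyBee/coding_challenges | Leetcode/Easy/3289) The Two Sneaky Numbers of Digitville.py | getSneakyNumbers
-- ===== SOURCE A (Python) =====
-- from typing import List
--
-- def getSneakyNumbers(nums: List[int]) -> List[int]:
--     seen = set()
--     output = []
--     for num in nums:
--         if num in seen:
--             output.append(num)
--         else:
--             seen.add(num)
--
--     return output
-- ===== SOURCE B (Python) =====
-- from typing import List
--
-- def getSneakyNumbers(nums: List[int]) -> List[int]:
--     # Group positions by value, drop each value's first position,
--     # sort the remaining positions, and gather the elements there.
--     pos = {}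
--     for i, num in enumerate(nums):
--         pos.setdefault(num, []).append(i)
--     dup_idx = sorted(i for idxs in pos.values() for i in idxs[1:])
--     return [nums[i] for i in dup_idx]
-- ===== Notes on version B (the rewrite author's own statement) =====
-- stated objective: alternative
-- what changed: B replaces A's single online pass with a seen-set by a group-then-sort pipeline: it groups positions by value in one pass, drops each value's first position, sorts the remaining positions, and gathers the elements at them.
import Mathlib
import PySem

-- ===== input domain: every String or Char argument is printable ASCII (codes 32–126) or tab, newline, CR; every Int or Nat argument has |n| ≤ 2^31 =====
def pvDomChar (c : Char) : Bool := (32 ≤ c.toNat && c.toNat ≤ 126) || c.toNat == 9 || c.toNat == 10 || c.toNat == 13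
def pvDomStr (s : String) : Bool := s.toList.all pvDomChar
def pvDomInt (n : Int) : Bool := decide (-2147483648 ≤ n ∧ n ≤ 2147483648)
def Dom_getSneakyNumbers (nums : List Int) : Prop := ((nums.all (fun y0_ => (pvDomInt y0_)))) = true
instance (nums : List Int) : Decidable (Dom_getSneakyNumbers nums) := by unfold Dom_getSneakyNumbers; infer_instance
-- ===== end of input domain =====

-- B groups positions by value, drops each value's first position, sorts the rest and gathers;
-- an alternative (not faster) decomposition, equal output on all inputs.

-- ===== PORT A =====
-- A: fold over nums carrying (seen : set, output); append num if already seen, else add to seen.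
def getSneakyNumbers (nums : List Int) : List Int :=
  (nums.foldl
    (fun (st : PySem.Set Int × List Int) num =>
      if PySem.Set.contains st.1 num then (st.1, st.2 ++ [num])
      else (PySem.Set.add st.1 num, st.2))
    (PySem.Set.empty, [])).2

-- ===== PORT B =====
-- B: pos = {}; for i, num in enumerate(nums): pos.setdefault(num, []).append(i)
--    dup_idx = sorted(i for idxs in pos.values() for i in idxs[1:])
--    return [nums[i] for i in dup_idx]
-- nums[i] is ported as pyGetD nums i 0: every i in dup_idx is a valid index, so it equals Python's nums[i].
def getSneakyNumbers_alt (nums : List Int) : List Int :=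
  let pos : PySem.Dict Int (List Int) :=
    (PySem.List.enumerate nums).foldl
      (fun d p => d.modify p.2 [] (· ++ [p.1])) PySem.Dict.empty
  let dupIdx := PySem.List.sorted ((PySem.Dict.values pos).flatMap (fun idxs => idxs.drop 1)) (fun x => x) false
  dupIdx.map (fun i => PySem.List.pyGetD nums i 0)

-- ===== PRECONDITION & SPEC =====
def Spec_getSneakyNumbers (nums : List Int) (out : List Int) : Prop := out = getSneakyNumbers_alt nums
instance (nums : List Int) (out : List Int) : Decidable (Spec_getSneakyNumbers nums out) := by unfold Spec_getSneakyNumbers; infer_instance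

-- ===== CLAIM (what is proved, stated in full; the proofs are below) =====
def Claim_equal_getSneakyNumbers : Prop := ∀ (nums : List Int), Dom_getSneakyNumbers nums → Spec_getSneakyNumbers nums (getSneakyNumbers nums)

-- ===== LEMMAS AND PROOFS =====

-- Reference scan: the literal prefix serves as the "seen" structure.
def dupScan (pre : List Int) : List Int → List Int
  | [] => []
  | n :: rest => (if n ∈ pre then [n] else []) ++ dupScan (pre ++ [n]) rest

theorem foldA_eq_dupScan (rest pre acc : List Int) :
    (rest.foldl
      (fun (st : PySem.Set Int × List Int) num =>
        if PySem.Set.contains st.1 num then (st.1, st.2 ++ [num])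
        else (PySem.Set.add st.1 num, st.2))
      (PySem.Set.ofList pre, acc)).2 = acc ++ dupScan pre rest := by
  induction rest generalizing pre acc with
  | nil => simp [dupScan]
  | cons n rest ih =>
    by_cases h : n ∈ pre
    · have hpre : PySem.Set.ofList pre = PySem.Set.ofList (pre ++ [n]) := by
        rw [PySem.Set.ofList_append_singleton,
          PySem.Set.add_of_mem (by simp [PySem.Set.mem_ofList, h])]
      calc (List.foldl _ (PySem.Set.ofList pre, acc) (n :: rest)).2
          = (List.foldl _ (PySem.Set.ofList (pre ++ [n]), acc ++ [n]) rest).2 := by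
            simp [List.foldl_cons, h, ← hpre]
        _ = (acc ++ [n]) ++ dupScan (pre ++ [n]) rest := ih _ _
        _ = acc ++ dupScan pre (n :: rest) := by simp [dupScan, h]
    · calc (List.foldl _ (PySem.Set.ofList pre, acc) (n :: rest)).2
          = (List.foldl _ (PySem.Set.ofList (pre ++ [n]), acc) rest).2 := by
            simp [List.foldl_cons, h, PySem.Set.ofList_append_singleton]
        _ = acc ++ dupScan (pre ++ [n]) rest := ih _ _
        _ = acc ++ dupScan pre (n :: rest) := by simp [dupScan, h]

-- The selected enumerate entries: (i, nums[i]) with nums[i] occurring before position i.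
def sel (nums : List Int) : List (Int × Int) :=
  (PySem.List.enumerate nums).filter
    (fun p => decide (p.2 ∈ PySem.List.slice nums none (some p.1)))

theorem sel_snd_eq_dupScan (rest pre : List Int) :
    ((PySem.List.enumerate rest (pre.length : Int)).filter
      (fun p => decide (p.2 ∈ PySem.List.slice (pre ++ rest) none (some p.1)))).map (·.2)
      = dupScan pre rest := by
  induction rest generalizing pre with
  | nil => simp [PySem.List.enumerate_nil, dupScan]
  | cons n rest ih =>
    have hslice : PySem.List.slice (pre ++ n :: rest) none (some (pre.length : Int)) = pre := by
      rw [PySem.List.slice_to_natCast]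
      exact List.take_left
    have hlen : ((pre.length : Int) + 1) = (((pre ++ [n]).length : Nat) : Int) := by simp
    have hre : pre ++ n :: rest = (pre ++ [n]) ++ rest := by simp
    have htail := ih (pre ++ [n])
    rw [← hre, ← hlen] at htail
    rw [PySem.List.enumerate_cons, List.filter_cons]
    by_cases h : n ∈ pre
    · simp [hslice, h, dupScan, htail]
    · simp [hslice, h, dupScan, htail]

theorem A_eq_sel_map (nums : List Int) :
    getSneakyNumbers nums = (sel nums).map (·.2) := by
  unfold getSneakyNumbers sel
  have hA := foldA_eq_dupScan nums [] []
  have hB := sel_snd_eq_dupScan nums []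
  simpa [PySem.Set.empty] using hA.trans (by simpa using hB.symm)

theorem sel_fst_pairwise (nums : List Int) :
    ((sel nums).map (·.1)).Pairwise (· < ·) := by
  exact List.Pairwise.map _ (fun _ _ h => h)
    (((PySem.List.pairwise_lt_enumerate nums 0)).sublist List.filter_sublist)

-- membership characterisation of sel's first components
theorem mem_sel_fst (nums : List Int) (i : Int) :
    i ∈ (sel nums).map (·.1) ↔
      ∃ (k : Nat) (hk : k < nums.length), i = (k : Int) ∧ nums[k] ∈ nums.take k := by
  unfold sel
  simp only [List.mem_map, List.mem_filter, PySem.List.mem_enumerate_iff, decide_eq_true_eq]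
  constructor
  · rintro ⟨p, ⟨⟨k, hk, rfl⟩, hmem⟩, rfl⟩
    refine ⟨k, hk, by simp, ?_⟩
    rwa [show ((0:Int) + (k:Nat)) = ((k:Nat):Int) by simp, PySem.List.slice_to_natCast] at hmem
  · rintro ⟨k, hk, rfl, hmem⟩
    refine ⟨((k:Int), nums[k]), ⟨⟨k, hk, by simp⟩, ?_⟩, rfl⟩
    simpa [PySem.List.slice_to_natCast] using hmem

-- positions (as Ints, ascending) at which the value v occurs in nums
def occ (nums : List Int) (v : Int) : List Int :=
  ((PySem.List.enumerate nums).filter (fun p => p.2 == v)).map (·.1)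

theorem occ_pairwise (nums : List Int) (v : Int) : (occ nums v).Pairwise (· < ·) :=
  List.Pairwise.map _ (fun _ _ h => h)
    (((PySem.List.pairwise_lt_enumerate nums 0)).sublist List.filter_sublist)

theorem mem_occ (nums : List Int) (v i : Int) :
    i ∈ occ nums v ↔ ∃ (k : Nat) (hk : k < nums.length), i = (k : Int) ∧ nums[k] = v := by
  unfold occ
  simp only [List.mem_map, List.mem_filter, PySem.List.mem_enumerate_iff, beq_iff_eq]
  constructor
  · rintro ⟨p, ⟨⟨k, hk, rfl⟩, hv⟩, rfl⟩
    exact ⟨k, hk, by simp, hv⟩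
  · rintro ⟨k, hk, rfl, hv⟩
    exact ⟨((k:Int), nums[k]), ⟨⟨k, hk, by simp⟩, hv⟩, rfl⟩

-- in a strictly increasing list, idxs[1:] holds exactly the non-minimal members
theorem mem_drop_one_of_pairwise_lt (l : List Int) (hl : l.Pairwise (· < ·)) (x : Int) :
    x ∈ l.drop 1 ↔ x ∈ l ∧ ∃ y ∈ l, y < x := by
  cases l with
  | nil => simp
  | cons a t =>
    simp only [List.drop_succ_cons, List.drop_zero, List.mem_cons]
    have ha : ∀ y ∈ t, a < y := (List.pairwise_cons.mp hl).1
    constructor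
    · intro hx
      exact ⟨Or.inr hx, a, Or.inl rfl, ha x hx⟩
    · rintro ⟨hx, y, hy, hyx⟩
      rcases hx with rfl | hx
      · rcases hy with rfl | hy
        · omega
        · exact absurd (ha y hy) (by omega)
      · exact hx

-- the dict built by B: lookup and keys
theorem pos_foldl_swap (nums : List Int) :
    (PySem.List.enumerate nums).foldl
        (fun (d : PySem.Dict Int (List Int)) p => d.modify p.2 [] (· ++ [p.1]))
        PySem.Dict.empty
      = ((PySem.List.enumerate nums).map (fun p => (p.2, p.1))).foldl
        (fun (d : PySem.Dict Int (List Int)) p => d.modify p.1 [] (· ++ [p.2]))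
        PySem.Dict.empty := by
  rw [List.foldl_map]

theorem getD_pos (nums : List Int) (v : Int) :
    ((PySem.List.enumerate nums).foldl
        (fun (d : PySem.Dict Int (List Int)) p => d.modify p.2 [] (· ++ [p.1]))
        PySem.Dict.empty).getD v [] = occ nums v := by
  rw [pos_foldl_swap, PySem.Dict.getD_foldl_modify_append]
  simp [occ, List.filter_map, List.map_map, Function.comp_def]

theorem keys_pos (nums : List Int) :
    ((PySem.List.enumerate nums).foldl
        (fun (d : PySem.Dict Int (List Int)) p => d.modify p.2 [] (· ++ [p.1]))
        PySem.Dict.empty).keys = PySem.Set.ofList nums := by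
  rw [PySem.Dict.keys_foldl_modify_key]
  simp [PySem.Dict.keys_empty, PySem.Set.update, PySem.Set.ofList_eq_foldl,
    PySem.List.map_snd_enumerate]

theorem B_dupIdx_perm (nums : List Int) :
    (((PySem.List.enumerate nums).foldl
        (fun (d : PySem.Dict Int (List Int)) p => d.modify p.2 [] (· ++ [p.1]))
        PySem.Dict.empty).values.flatMap (fun idxs => idxs.drop 1)).Perm
      ((sel nums).map (·.1)) := by
  set pos := (PySem.List.enumerate nums).foldl
      (fun (d : PySem.Dict Int (List Int)) p => d.modify p.2 [] (· ++ [p.1]))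
      PySem.Dict.empty with hpos
  have hnodup : pos.keys.Nodup := by
    rw [hpos, keys_pos]; exact PySem.Set.nodup_ofList nums
  have hvals : pos.values = (PySem.Set.ofList nums).map (fun v => occ nums v) := by
    rw [PySem.Dict.values_eq_map_keys pos hnodup []]
    rw [hpos, keys_pos]
    exact List.map_congr_left (fun v _ => getD_pos nums v)
  rw [hvals, List.flatMap_map]
  have hflat : ∀ x : Int,
      x ∈ (PySem.Set.ofList nums).flatMap (fun v => (occ nums v).drop 1) ↔
        x ∈ (sel nums).map (·.1) := by
    intro x
    rw [List.mem_flatMap, mem_sel_fst]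
    constructor
    · rintro ⟨v, hv, hx⟩
      rw [mem_drop_one_of_pairwise_lt _ (occ_pairwise nums v)] at hx
      obtain ⟨hxo, y, hy, hyx⟩ := hx
      obtain ⟨k, hk, rfl, hkv⟩ := (mem_occ nums v x).mp hxo
      obtain ⟨j, hj, hjy, hjv⟩ := (mem_occ nums v y).mp hy
      refine ⟨k, hk, rfl, ?_⟩
      rw [List.mem_take_iff_getElem]
      exact ⟨j, by omega, by rw [hjv, hkv]⟩
    · rintro ⟨k, hk, rfl, hmem⟩
      obtain ⟨j, hj, hjv⟩ := List.mem_take_iff_getElem.mp hmem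
      refine ⟨nums[k], by simp [PySem.Set.mem_ofList], ?_⟩
      rw [mem_drop_one_of_pairwise_lt _ (occ_pairwise nums nums[k])]
      refine ⟨(mem_occ nums nums[k] (k:Int)).mpr ⟨k, hk, rfl, rfl⟩,
        (j:Int), (mem_occ nums nums[k] (j:Int)).mpr ⟨j, by omega, rfl, hjv⟩, by omega⟩
  have hnd1 : ((PySem.Set.ofList nums).flatMap (fun v => (occ nums v).drop 1)).Nodup := by
    rw [List.nodup_flatMap]
    constructor
    · intro v _
      exact ((occ_pairwise nums v).sublist (List.drop_sublist 1 _)).imp (fun h => Int.ne_of_lt h)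
    · have hne := PySem.Set.nodup_ofList (α := Int) nums
      refine hne.imp ?_
      intro v w hvw x hx hx'
      obtain ⟨k, hk, rfl, hkv⟩ := (mem_occ nums v x).mp (List.mem_of_mem_drop hx)
      obtain ⟨k', hk', hkk, hkw⟩ := (mem_occ nums w (k:Int)).mp (List.mem_of_mem_drop hx')
      have : k = k' := by omega
      cases this
      exact hvw (hkv.symm.trans hkw)
  have hnd2 : ((sel nums).map (·.1)).Nodup :=
    (sel_fst_pairwise nums).imp (fun h => Int.ne_of_lt h)
  exact (List.perm_ext_iff_of_nodup hnd1 hnd2).mpr hflat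

theorem B_eq_sel (nums : List Int) :
    getSneakyNumbers_alt nums = (sel nums).map (·.2) := by
  unfold getSneakyNumbers_alt
  simp only []
  rw [PySem.List.sorted_eq_of_perm_of_pairwise_lt _ _ (fun x => x)
    ((B_dupIdx_perm nums).symm) (sel_fst_pairwise nums), List.map_map]
  refine List.map_congr_left ?_
  intro p hp
  have hp' : p ∈ PySem.List.enumerate nums := List.mem_of_mem_filter hp
  obtain ⟨k, hk, rfl⟩ := (PySem.List.mem_enumerate_iff nums 0 p).mp hp'
  simp [PySem.List.pyGetD_natCast, List.getD_eq_getElem?_getD, hk]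

-- ===== VERDICT (by name: the statement is the Claim_ definition above) =====
theorem getSneakyNumbers_spec : Claim_equal_getSneakyNumbers := by
  intro nums _
  unfold Spec_getSneakyNumbers
  rw [A_eq_sel_map, B_eq_sel]
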